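-- pv_equiv track=rewrite | github.com/roy54x/Lexical_semantics_in_cross-lingual_transfer | mapping_of_lexicons/graph_utils.py | filter_all_words_1to1
-- ===== SOURCE A (Python) =====
-- def filter_all_words_1to1(word_dic):
--     new_dic = {}
--     new_dic_values = []
--     for source_key, source_value in word_dic.items():
--         source_value_filtered = {key: value for key, value in source_value.items() if key not in new_dic_values}
--         target_values_list = list(source_value_filtered.values())
--         if not target_values_list:
--             continue
--         max_target_value = max(target_values_list)
--         max_index = target_values_list.index(max_target_value)
--         max_target_key = list(source_value_filtered.keys())[max_index]
--         new_dic[source_key] = {max_target_key: max_target_value}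
--         new_dic_values.append(max_target_key)
--     return new_dic
-- ===== SOURCE B (Python) =====
-- def filter_all_words_1to1(word_dic):
--     new_dic = {}
--     used = set()
--     for source_key, source_value in word_dic.items():
--         for key, value in sorted(source_value.items(), key=lambda kv: kv[1], reverse=True):
--             if key not in used:
--                 new_dic[source_key] = {key: value}
--                 used.add(key)
--                 break
--     return new_dic
-- ===== Notes on version B (the rewrite author's own statement) =====
-- stated objective: faster
-- what changed: Replaces A's filter-comprehension + values-list + max + .index + keys-list reconstruction per source by a different algorithm: stable-sort each source's candidates by value descending and take the first candidate whose key is not in a used-set (stability makes the first sorted unused entry the first-occurring maximum, matching A's max+.index tie-break).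
import Mathlib
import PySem

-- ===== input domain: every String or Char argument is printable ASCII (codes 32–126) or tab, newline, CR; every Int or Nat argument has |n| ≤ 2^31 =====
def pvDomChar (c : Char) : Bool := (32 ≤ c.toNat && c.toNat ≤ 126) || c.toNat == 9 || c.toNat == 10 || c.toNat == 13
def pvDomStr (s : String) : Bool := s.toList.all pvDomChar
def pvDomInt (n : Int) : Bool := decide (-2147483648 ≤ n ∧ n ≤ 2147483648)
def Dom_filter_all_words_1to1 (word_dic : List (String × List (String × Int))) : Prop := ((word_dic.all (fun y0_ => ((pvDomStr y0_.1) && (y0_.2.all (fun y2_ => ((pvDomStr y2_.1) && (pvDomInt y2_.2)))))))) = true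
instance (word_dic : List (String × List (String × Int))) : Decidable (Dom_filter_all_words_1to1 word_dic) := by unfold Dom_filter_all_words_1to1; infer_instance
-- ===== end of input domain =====

-- B replaces A's filter-comprehension + values-list + max + .index + keys-list chain by a different
-- algorithm: stable-sort each source's candidates by value descending and take the first unused one.

-- ===== PORT A =====
-- A's loop body: filter out already-used target keys, take the values list, if empty continue,
-- else pick the max value, locate its first index, read the key at that index from the keys list,
-- store {key: value} under source_key and append the key to new_dic_values.
def stepA (st : PySem.Dict String (List (String × Int)) × List String)
    (p : String × List (String × Int)) :
    PySem.Dict String (List (String × Int)) × List String :=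
  let source_value_filtered := p.2.filter (fun kv => !(st.2.contains kv.1))
  let target_values_list := source_value_filtered.map (fun kv => kv.2)
  if target_values_list.isEmpty then st
  else
    match PySem.List.max? target_values_list (fun v => v) with
    | none => st                                   -- unreachable: the list is nonempty
    | some max_target_value =>
      match PySem.List.index? target_values_list max_target_value with
      | none => st                                 -- unreachable: the max is in the list
      | some max_index =>
        match (source_value_filtered.map (fun kv => kv.1))[max_index]? with
        | none => st                               -- unreachable: the index is in range
        | some max_target_key =>
          (PySem.Dict.insert st.1 p.1 [(max_target_key, max_target_value)],
           st.2 ++ [max_target_key])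

def filter_all_words_1to1 (word_dic : List (String × List (String × Int))) : List (String × List (String × Int)) :=
  (word_dic.foldl stepA (PySem.Dict.empty, ([] : List String))).1.items

-- ===== PORT B =====
-- B's loop body: sorted(source_value.items(), key=value, reverse=True), then the inner
-- for-with-break takes the FIRST entry whose key is not used (find?), records it and marks it used.
def stepB (st : PySem.Dict String (List (String × Int)) × PySem.Set String)
    (p : String × List (String × Int)) :
    PySem.Dict String (List (String × Int)) × PySem.Set String :=
  match (PySem.List.sorted p.2 (fun kv => kv.2) true).find?
      (fun kv => !(PySem.Set.contains st.2 kv.1)) with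
  | none => st
  | some kv => (PySem.Dict.insert st.1 p.1 [kv], PySem.Set.add st.2 kv.1)

def filter_all_words_1to1_alt (word_dic : List (String × List (String × Int))) : List (String × List (String × Int)) :=
  (word_dic.foldl stepB (PySem.Dict.empty, PySem.Set.empty)).1.items

-- ===== PRECONDITION & SPEC =====
def Spec_filter_all_words_1to1 (word_dic : List (String × List (String × Int))) (out : List (String × List (String × Int))) : Prop := out = filter_all_words_1to1_alt word_dic
instance (word_dic : List (String × List (String × Int))) (out : List (String × List (String × Int))) : Decidable (Spec_filter_all_words_1to1 word_dic out) := by unfold Spec_filter_all_words_1to1; infer_instance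

-- ===== CLAIM (what is proved, stated in full; the proofs are below) =====
def Claim_equal_filter_all_words_1to1 : Prop := ∀ (word_dic : List (String × List (String × Int))), Dom_filter_all_words_1to1 word_dic → Spec_filter_all_words_1to1 word_dic (filter_all_words_1to1 word_dic)

-- ===== LEMMAS AND PROOFS =====

-- first maximal pair of kv :: t, ties to the left
def fmc (kv : String × Int) : List (String × Int) → String × Int
  | [] => kv
  | b :: t => if kv.2 < (fmc b t).2 then fmc b t else kv

-- first maximal pair of a list (none if empty)
def fm : List (String × Int) → Option (String × Int)
  | [] => none
  | kv :: t => some (fmc kv t)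

theorem fmc_cons (kv b : String × Int) (t : List (String × Int)) :
    fmc kv (b :: t) = if kv.2 < (fmc b t).2 then fmc b t else kv := rfl

theorem fmc_le (kv : String × Int) (t : List (String × Int)) : kv.2 ≤ (fmc kv t).2 := by
  cases t with
  | nil => simp [fmc]
  | cons b t =>
    rw [fmc_cons]
    by_cases h : kv.2 < (fmc b t).2
    · rw [if_pos h]; exact le_of_lt h
    · rw [if_neg h]

theorem fmc_mem (kv : String × Int) (t : List (String × Int)) : fmc kv t ∈ kv :: t := by
  induction t generalizing kv with
  | nil => simp [fmc]
  | cons b t ih =>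
    rw [fmc_cons]
    by_cases h : kv.2 < (fmc b t).2
    · rw [if_pos h]; exact List.mem_cons_of_mem _ (ih b)
    · rw [if_neg h]; exact List.mem_cons_self

theorem fmc_isMax (kv : String × Int) (t : List (String × Int)) :
    ∀ y ∈ kv :: t, y.2 ≤ (fmc kv t).2 := by
  induction t generalizing kv with
  | nil => intro y hy; simp at hy; simp [fmc, hy]
  | cons b t ih =>
    intro y hy
    rw [fmc_cons]
    rcases List.mem_cons.1 hy with rfl | hy'
    · by_cases h : y.2 < (fmc b t).2
      · rw [if_pos h]; exact le_of_lt h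
      · rw [if_neg h]
    · have hle := ih b y hy'
      by_cases h : kv.2 < (fmc b t).2
      · rw [if_pos h]; exact hle
      · rw [if_neg h]; exact le_trans hle (not_lt.1 h)

theorem fmc_split (kv : String × Int) (t : List (String × Int)) :
    ∃ pre suf, kv :: t = pre ++ (fmc kv t) :: suf ∧ ∀ y ∈ pre, y.2 < (fmc kv t).2 := by
  induction t generalizing kv with
  | nil => exact ⟨[], [], by simp [fmc], by simp⟩
  | cons b t ih =>
    by_cases h : kv.2 < (fmc b t).2
    · obtain ⟨pre, suf, hs, hp⟩ := ih b
      refine ⟨kv :: pre, suf, ?_, ?_⟩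
      · rw [fmc_cons, if_pos h, List.cons_append, ← hs]
      · intro y hy
        rw [fmc_cons, if_pos h]
        rcases List.mem_cons.1 hy with rfl | hy'
        · exact h
        · exact hp y hy'
    · refine ⟨[], b :: t, ?_, by simp⟩
      rw [fmc_cons, if_neg h]
      rfl

theorem fm_mem {l : List (String × Int)} {c : String × Int} (h : fm l = some c) : c ∈ l := by
  cases l with
  | nil => simp [fm] at h
  | cons kv t =>
    rw [show fm (kv :: t) = some (fmc kv t) from rfl] at h
    cases h
    exact fmc_mem kv t

theorem foldl_max_top {t : List Int} {a m : Int} (h1 : a ≤ m) (h2 : ∀ y ∈ t, y ≤ m)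
    (h3 : m = a ∨ m ∈ t) : t.foldl max a = m := by
  have hle := PySem.List.le_foldl_max t a
  have hmem := PySem.List.foldl_max_mem t a
  apply le_antisymm
  · rcases hmem with h | h
    · rw [h]; exact h1
    · exact h2 _ h
  · rcases h3 with h | h
    · rw [h]; exact hle.1
    · exact hle.2 _ h

-- A's filter/values/max/index/keys chain, for any default and continuation, computes fm
theorem chainA_eq {α : Type} (l : List (String × Int)) (dflt : α) (f : String × Int → α) :
    (if (l.map (fun kv => kv.2)).isEmpty then dflt
     else
       match PySem.List.max? (l.map (fun kv => kv.2)) (fun v => v) with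
       | none => dflt
       | some m =>
         match PySem.List.index? (l.map (fun kv => kv.2)) m with
         | none => dflt
         | some i =>
           match (l.map (fun kv => kv.1))[i]? with
           | none => dflt
           | some k => f (k, m))
    = (match fm l with
       | none => dflt
       | some c => f c) := by
  cases l with
  | nil => rfl
  | cons kv t =>
    obtain ⟨pre, suf, hsplit, hpre⟩ := fmc_split kv t
    have hmax := fmc_isMax kv t
    have hmem := fmc_mem kv t
    have hm : PySem.List.max? (kv.2 :: t.map (fun kv => kv.2)) (fun v => v)
        = some (fmc kv t).2 := by
      rw [PySem.List.max?_id_cons]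
      congr 1
      apply foldl_max_top (fmc_le kv t)
      · intro y hy
        rcases List.mem_map.1 hy with ⟨z, hz, rfl⟩
        exact hmax z (List.mem_cons_of_mem _ hz)
      · rcases List.mem_cons.1 hmem with h | h
        · exact Or.inl (congrArg Prod.snd h)
        · exact Or.inr (List.mem_map_of_mem h)
    have hsplit2 : kv.2 :: t.map (fun kv => kv.2)
        = pre.map (fun kv => kv.2) ++ (fmc kv t).2 :: suf.map (fun kv => kv.2) := by
      have h2 := congrArg (List.map (fun kv => kv.2)) hsplit
      simpa using h2
    have hsplit1 : kv.1 :: t.map (fun kv => kv.1)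
        = pre.map (fun kv => kv.1) ++ (fmc kv t).1 :: suf.map (fun kv => kv.1) := by
      have h1 := congrArg (List.map (fun kv => kv.1)) hsplit
      simpa using h1
    have hidx : PySem.List.index? (kv.2 :: t.map (fun kv => kv.2)) (fmc kv t).2
        = some pre.length := by
      apply (PySem.List.index?_eq_some_iff _ _ _).2
      refine ⟨pre.map (fun kv => kv.2), suf.map (fun kv => kv.2), hsplit2, by simp, ?_⟩
      intro hin
      rcases List.mem_map.1 hin with ⟨z, hz, hz2⟩
      exact absurd hz2 (ne_of_lt (hpre z hz))
    have hkey : (kv.1 :: t.map (fun kv => kv.1))[pre.length]? = some (fmc kv t).1 := by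
      rw [hsplit1, List.getElem?_append_right (by simp)]
      simp
    simp only [List.map_cons, List.isEmpty_cons, Bool.false_eq_true, if_false,
      hm, hidx, hkey, fm]

-- the descending insertion step used by PySem's reverse stable sort
theorem insertBy_nil {α : Type} (b : α → α → Bool) (x : α) :
    PySem.List.insertBy b x [] = [x] := rfl

theorem insertBy_cons {α : Type} (b : α → α → Bool) (x y : α) (ys : List α) :
    PySem.List.insertBy b x (y :: ys)
      = if b x y then x :: y :: ys else y :: PySem.List.insertBy b x ys := rfl

-- inserting an element the predicate rejects does not change find?
theorem find?_insertBy_of_not (b : (String × Int) → (String × Int) → Bool)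
    (p : (String × Int) → Bool) (x : String × Int) (hx : p x = false)
    (d : List (String × Int)) :
    (PySem.List.insertBy b x d).find? p = d.find? p := by
  induction d with
  | nil => simp [insertBy_nil, List.find?, hx]
  | cons y ys ih =>
    rw [insertBy_cons]
    by_cases h : b x y = true
    · simp [h, List.find?, hx]
    · simp only [h]
      rw [if_neg (by simp_all)]
      cases hp : p y with
      | true => simp [List.find?, hp]
      | false => simp [List.find?, hp, ih]

-- inserting an accepted element x into a value-descending list: find? returns the old first
-- hit if its value is ≥ x's, otherwise x
theorem find?_insertBy_desc (p : (String × Int) → Bool) (x : String × Int) (hx : p x = true)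
    (d : List (String × Int)) (hd : d.Pairwise (fun a b => b.2 ≤ a.2)) :
    (PySem.List.insertBy (fun a b => decide (b.2 < a.2)) x d).find? p
      = (match d.find? p with
         | none => some x
         | some c => if x.2 ≤ c.2 then some c else some x) := by
  induction d with
  | nil => simp [insertBy_nil, List.find?, hx]
  | cons y ys ih =>
    have hy : ∀ z ∈ ys, z.2 ≤ y.2 := (List.pairwise_cons.1 hd).1
    have hys : ys.Pairwise (fun a b => b.2 ≤ a.2) := (List.pairwise_cons.1 hd).2
    rw [insertBy_cons]
    by_cases hxy : y.2 < x.2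
    · rw [if_pos (by simpa using hxy)]
      rw [show (x :: y :: ys).find? p = some x by simp [List.find?, hx]]
      cases hp : p y with
      | true =>
        rw [show (y :: ys).find? p = some y by simp [List.find?, hp]]
        show some x = if x.2 ≤ y.2 then some y else some x
        rw [if_neg (by omega)]
      | false =>
        rw [show (y :: ys).find? p = ys.find? p by simp [List.find?, hp]]
        cases hc : ys.find? p with
        | none => rfl
        | some c =>
          have hcy : c.2 ≤ y.2 := hy c (List.mem_of_find?_eq_some hc)
          show some x = if x.2 ≤ c.2 then some c else some x
          rw [if_neg (by omega)]
    · rw [if_neg (by simpa using hxy)]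
      cases hp : p y with
      | true =>
        rw [show (y :: PySem.List.insertBy _ x ys).find? p = some y by simp [List.find?, hp],
          show (y :: ys).find? p = some y by simp [List.find?, hp]]
        show some y = if x.2 ≤ y.2 then some y else some x
        rw [if_pos (by omega)]
      | false =>
        rw [show (y :: PySem.List.insertBy (fun a b => decide (b.2 < a.2)) x ys).find? p
              = (PySem.List.insertBy (fun a b => decide (b.2 < a.2)) x ys).find? p
            by simp [List.find?, hp],
          show (y :: ys).find? p = ys.find? p by simp [List.find?, hp]]
        exact ih hys

-- appending to the right of fm: the old first max survives ties, a strictly larger x wins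
theorem fmc_append (a x : String × Int) (t : List (String × Int)) :
    fmc a (t ++ [x]) = if x.2 ≤ (fmc a t).2 then fmc a t else x := by
  induction t generalizing a with
  | nil =>
    rw [show fmc a ([] ++ [x]) = if a.2 < x.2 then x else a from rfl,
      show fmc a [] = a from rfl]
    by_cases h : a.2 < x.2
    · rw [if_pos h, if_neg (by omega)]
    · rw [if_neg h, if_pos (by omega)]
  | cons b s ih =>
    rw [show fmc a ((b :: s) ++ [x]) = fmc a (b :: (s ++ [x])) from rfl, fmc_cons,
      ih b, fmc_cons]
    by_cases h1 : x.2 ≤ (fmc b s).2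
    · rw [if_pos h1]
      by_cases h2 : a.2 < (fmc b s).2
      · rw [if_pos h2, if_pos h1]
      · rw [if_neg h2, if_pos (by omega)]
    · rw [if_neg h1]
      by_cases h2 : a.2 < (fmc b s).2
      · rw [if_pos h2, if_pos (by omega), if_neg h1]
      · rw [if_neg h2]
        by_cases h3 : a.2 < x.2
        · rw [if_pos h3, if_neg (by omega)]
        · rw [if_neg h3, if_pos (by omega)]

theorem fm_append (m : List (String × Int)) (x : String × Int) :
    fm (m ++ [x]) = (match fm m with
                     | none => some x
                     | some c => if x.2 ≤ c.2 then some c else some x) := by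
  cases m with
  | nil => rfl
  | cons a t =>
    rw [show fm ((a :: t) ++ [x]) = some (fmc a (t ++ [x])) from rfl, fmc_append,
      show fm (a :: t) = some (fmc a t) from rfl]
    show some (if x.2 ≤ (fmc a t).2 then fmc a t else x)
        = if x.2 ≤ (fmc a t).2 then some (fmc a t) else some x
    by_cases h : x.2 ≤ (fmc a t).2
    · rw [if_pos h, if_pos h]
    · rw [if_neg h, if_neg h]

-- MAIN: first predicate hit in the value-descending stable sort = first maximum of the
-- predicate-filtered list in original order
theorem find_sorted_eq_fm (p : (String × Int) → Bool) (l : List (String × Int)) :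
    (PySem.List.sorted l (fun kv => kv.2) true).find? p = fm (l.filter p) := by
  induction l using List.reverseRecOn with
  | nil => rfl
  | append_singleton l x ih =>
    have hins : PySem.List.sorted (l ++ [x]) (fun kv : String × Int => kv.2) true
        = PySem.List.insertBy (fun a b => decide (b.2 < a.2)) x
            (PySem.List.sorted l (fun kv => kv.2) true) := by
      rw [PySem.List.sorted_rev_eq_foldl_insertBy, PySem.List.sorted_rev_eq_foldl_insertBy,
        List.foldl_append]
      rfl
    have hpair := PySem.List.sorted_pairwise_rev l (fun kv : String × Int => kv.2)
    rw [hins, List.filter_append]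
    cases hp : p x with
    | false =>
      rw [find?_insertBy_of_not _ p x hp, ih]
      simp [List.filter, hp]
    | true =>
      rw [find?_insertBy_desc p x hp _ hpair, ih,
        show List.filter p [x] = [x] by simp [List.filter, hp], fm_append]

-- the two loop bodies agree on every state
theorem step_eq (st : PySem.Dict String (List (String × Int)) × List String)
    (p : String × List (String × Int)) : stepA st p = stepB st p := by
  have hA : stepA st p
      = (match fm (p.2.filter (fun kv => !(st.2.contains kv.1))) with
         | none => st
         | some kv => (PySem.Dict.insert st.1 p.1 [kv], st.2 ++ [kv.1])) :=
    chainA_eq (p.2.filter (fun kv => !(st.2.contains kv.1))) st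
      (fun kv => (PySem.Dict.insert st.1 p.1 [kv], st.2 ++ [kv.1]))
  have hB : stepB st p
      = (match fm (p.2.filter (fun kv => !(st.2.contains kv.1))) with
         | none => st
         | some kv => (PySem.Dict.insert st.1 p.1 [kv], PySem.Set.add st.2 kv.1)) := by
    rw [show stepB st p
        = (match (PySem.List.sorted p.2 (fun kv => kv.2) true).find?
              (fun kv => !(PySem.Set.contains st.2 kv.1)) with
           | none => st
           | some kv => (PySem.Dict.insert st.1 p.1 [kv], PySem.Set.add st.2 kv.1)) from rfl,
      find_sorted_eq_fm]
    rfl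
  rw [hA, hB]
  cases hf : fm (p.2.filter (fun kv => !(st.2.contains kv.1))) with
  | none => rfl
  | some c =>
    show (PySem.Dict.insert st.1 p.1 [c], st.2 ++ [c.1])
        = (PySem.Dict.insert st.1 p.1 [c], PySem.Set.add st.2 c.1)
    have hcont : st.2.contains c.1 = false := by
      have hmemc : c ∈ p.2.filter (fun kv => !(st.2.contains kv.1)) := fm_mem hf
      have h2 := List.of_mem_filter hmemc
      simpa using h2
    rw [show PySem.Set.add st.2 c.1
        = if st.2.contains c.1 then st.2 else st.2 ++ [c.1] from rfl, hcont]
    rw [if_neg (by simp)]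

-- the whole loops agree
theorem foldl_step_eq (word_dic : List (String × List (String × Int)))
    (st : PySem.Dict String (List (String × Int)) × List String) :
    word_dic.foldl stepA st = word_dic.foldl stepB st := by
  induction word_dic generalizing st with
  | nil => rfl
  | cons p rest ih => rw [List.foldl_cons, List.foldl_cons, step_eq st p]; exact ih _

-- ===== VERDICT (by name: the statement is the Claim_ definition above) =====
theorem filter_all_words_1to1_spec : Claim_equal_filter_all_words_1to1 := by
  intro word_dic _
  show filter_all_words_1to1 word_dic = filter_all_words_1to1_alt word_dic
  unfold filter_all_words_1to1 filter_all_words_1to1_alt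
  rw [foldl_step_eq word_dic (PySem.Dict.empty, ([] : List String))]
  rfl
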